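-- pv_equiv track=rewrite | github.com/anonymoof1528/The-lit-anki | python/empty.py | createEmptyList
-- ===== SOURCE A (Python) =====
-- def createEmptyList(lines):
--     dataList = []
--     currentTerm = ""
--     currentDefinition = ""
--     term = True
--     temp = []
--
--     for line in lines:
--         line = line.strip()
--         temp.append(line)
--         if len(temp) == 2:
--             if temp[1] == "":
--                 dataList.append(temp[0])
--             temp = []
--     return dataList
-- ===== SOURCE B (Python) =====
-- def createEmptyList(lines):
--     items = [l.strip() for l in lines]
--     return [first for first, second in zip(items[::2], items[1::2]) if second == ""]
-- ===== Notes on version B (the rewrite author's own statement) =====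
-- stated objective: simpler
-- what changed: Replaces A's running two-element buffer/flag state machine inside one loop by precomputing the stripped list and zipping its even/odd slices into explicit pairs, then filtering.
import Mathlib
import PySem

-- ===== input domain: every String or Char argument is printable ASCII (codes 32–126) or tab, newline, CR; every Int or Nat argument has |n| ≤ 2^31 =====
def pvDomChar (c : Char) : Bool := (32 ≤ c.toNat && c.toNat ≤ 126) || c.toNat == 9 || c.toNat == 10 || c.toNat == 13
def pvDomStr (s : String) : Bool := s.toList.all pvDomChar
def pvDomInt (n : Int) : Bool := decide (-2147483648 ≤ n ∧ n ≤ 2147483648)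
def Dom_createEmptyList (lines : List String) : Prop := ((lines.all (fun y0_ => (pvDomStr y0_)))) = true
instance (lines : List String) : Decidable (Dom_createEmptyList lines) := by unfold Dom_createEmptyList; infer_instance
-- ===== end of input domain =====

-- ===== PORT A =====
-- One honest line: B strips all lines up front and filters explicit even/odd-slice pairs
-- instead of A's running two-element buffer; objective: simpler. Return-value equivalence only.
-- Literal port of A: a fold carrying (dataList, temp); temp[0]/temp[1] read via pyGet?,
-- exact because they are only read under the length-2 guard.
def createEmptyList (lines : List String) : List String :=
  (lines.foldl (fun (st : List String × List String) line =>
      let line := PySem.Str.strip line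
      let temp := st.2 ++ [line]
      if temp.length = 2 then
        ((if (PySem.List.pyGet? temp 1).getD "" = "" then st.1 ++ [(PySem.List.pyGet? temp 0).getD ""] else st.1), [])
      else (st.1, temp)) ([], [])).1

-- ===== PORT B =====
-- hand port of Python's step-2 slice xs[::2] (PySem has no step slicing): every other element
def pvEveryOther {α : Type} : List α → List α
  | [] => []
  | [a] => [a]
  | a :: _ :: rest => a :: pvEveryOther rest

def createEmptyList_alt (lines : List String) : List String :=
  let items := lines.map PySem.Str.strip
  ((pvEveryOther items).zip (pvEveryOther items.tail)).filterMap
    (fun p => if p.2 = "" then some p.1 else none)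

-- ===== PRECONDITION & SPEC =====
def Spec_createEmptyList (lines : List String) (out : List String) : Prop := out = createEmptyList_alt lines
instance (lines : List String) (out : List String) : Decidable (Spec_createEmptyList lines out) := by unfold Spec_createEmptyList; infer_instance

-- ===== CLAIM (what is proved, stated in full; the proofs are below) =====
def Claim_equal_createEmptyList : Prop := ∀ (lines : List String), Dom_createEmptyList lines → Spec_createEmptyList lines (createEmptyList lines)

-- ===== LEMMAS AND PROOFS =====

-- ===== VERDICT (by name: the statement is the Claim_ definition above) =====
theorem pvEveryOther_cons {α : Type} (x : α) (m : List α) :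
    pvEveryOther (x :: m) = x :: pvEveryOther m.tail := by
  cases m <;> rfl

theorem alt_nil : createEmptyList_alt [] = [] := rfl

theorem alt_single (a : String) : createEmptyList_alt [a] = [] := rfl

theorem alt_cons_cons (a b : String) (rest : List String) :
    createEmptyList_alt (a :: b :: rest) =
      (if PySem.Str.strip b = "" then [PySem.Str.strip a] else []) ++ createEmptyList_alt rest := by
  simp only [createEmptyList_alt, List.map, pvEveryOther_cons, List.tail,
    List.zip_cons_cons, List.filterMap]
  split_ifs <;> simp

def pvStep (st : List String × List String) (line : String) : List String × List String :=
  let line := PySem.Str.strip line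
  let temp := st.2 ++ [line]
  if temp.length = 2 then
    ((if (PySem.List.pyGet? temp 1).getD "" = "" then st.1 ++ [(PySem.List.pyGet? temp 0).getD ""] else st.1), [])
  else (st.1, temp)

theorem pvStep2 (acc : List String) (a b : String) :
    pvStep (pvStep (acc, []) a) b =
      ((if PySem.Str.strip b = "" then acc ++ [PySem.Str.strip a] else acc), []) := by
  simp [pvStep, PySem.List.pyGet?, PySem.List.pyIdx?]

theorem pvFold_eq (lines acc : List String) :
    (lines.foldl pvStep (acc, [])).1 = acc ++ createEmptyList_alt lines := by
  induction lines using pvEveryOther.induct generalizing acc with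
  | case1 => simp [alt_nil]
  | case2 a => simp [List.foldl, pvStep, alt_single]
  | case3 a b rest ih =>
      show (List.foldl pvStep (pvStep (pvStep (acc, []) a) b) rest).1 = _
      rw [pvStep2, ih, alt_cons_cons]
      split_ifs <;> simp

theorem createEmptyList_spec : Claim_equal_createEmptyList := by
  intro lines _
  unfold Spec_createEmptyList
  show (lines.foldl pvStep ([], [])).1 = _
  simpa using pvFold_eq lines []
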